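-- pv_equiv track=rewrite | github.com/Open-HEMS/pvcast-frontend | pvcastfrontend/02-config.py | generate_regex_pattern
-- ===== SOURCE A (Python) =====
-- import itertools
--
-- def generate_regex_pattern(input_string: str) -> str:
--     """Generate a regex pattern from a string.
--
--     A string could be "Yes no maybe" and the pattern would become:
--     ((yes).*(no).*(maybe))|((yes).*(maybe).*(no))|((no).*(yes).*(maybe))|... etc
--
--     :param input_string: the input string to generate the pattern from
--     :return: the generated pattern as a string
--     """
--     words = input_string.split()
--     words = filter(lambda x: len(x) > 0, words)
--     word_permutations = itertools.permutations(words)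
--     patterns = []
--
--     for perm in word_permutations:
--         pattern_part = ".*".join(f"(?i)({word})" for word in perm)
--         patterns.append(f"({pattern_part})")
--
--     return "|".join(patterns)
-- ===== SOURCE B (Python) =====
-- def generate_regex_pattern(input_string: str) -> str:
--     """Generate the same alternation-of-permutations regex, but by a recursive
--     pick-and-build that fuses permutation generation with string assembly."""
--     words = [w for w in input_string.split() if w]
--     if not words:
--         return "()"
--
--     patterns = []
--
--     def picks(lst):
--         if not lst:
--             return []
--         head, tail = lst[0], lst[1:]
--         return [(head, tail)] + [(w, [head] + rest) for (w, rest) in picks(tail)]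
--
--     def build(remaining, prefix):
--         if not remaining:
--             patterns.append("(" + prefix + ")")
--         else:
--             for w, rest in picks(remaining):
--                 build(rest, prefix + ".*" + "(?i)(" + w + ")")
--
--     for w, rest in picks(words):
--         build(rest, "(?i)(" + w + ")")
--
--     return "|".join(patterns)
-- ===== Notes on version B (the rewrite author's own statement) =====
-- stated objective: alternative
-- what changed: Replaces itertools.permutations followed by a separate join of each tuple with a recursive pick-and-build: a picks helper splits the list into (element, rest) pairs in index order and the recursion assembles each alternative's pattern string directly while descending, appending finished patterns as it goes.
import Mathlib
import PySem

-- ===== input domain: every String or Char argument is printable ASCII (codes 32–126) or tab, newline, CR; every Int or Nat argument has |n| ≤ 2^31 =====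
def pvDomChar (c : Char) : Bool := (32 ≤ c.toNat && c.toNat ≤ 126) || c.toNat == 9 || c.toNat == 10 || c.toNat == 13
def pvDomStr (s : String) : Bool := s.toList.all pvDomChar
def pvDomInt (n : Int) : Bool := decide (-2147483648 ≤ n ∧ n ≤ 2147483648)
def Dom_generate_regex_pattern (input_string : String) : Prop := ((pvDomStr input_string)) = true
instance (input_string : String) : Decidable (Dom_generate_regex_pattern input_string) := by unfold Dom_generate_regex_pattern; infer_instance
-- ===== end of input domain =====

-- B replaces the itertools.permutations-then-join pipeline with a recursive pick-and-build
-- that assembles each alternative's pattern string directly while generating (objective: alternative).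


-- ===== PORT A =====
-- itertools.permutations(ws): in index order, yields ws[i] followed by each permutation of
-- ws with index i removed (its documented recursive equivalent); fuel = list length,
-- always called with the exact length. ws[i] via getD with i < length, so exact.
def pvPermsA : Nat → List String → List (List String)
  | 0, _ => [[]]
  | n + 1, xs =>
      (List.range xs.length).flatMap fun i =>
        (pvPermsA n (xs.take i ++ xs.drop (i + 1))).map (fun p => xs.getD i "" :: p)

def generate_regex_pattern (input_string : String) : String :=
  let words := PySem.Str.split₀ input_string
  let words2 := words.filter (fun x => decide (0 < PySem.Str.len x))
  let patterns := (pvPermsA words2.length words2).map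
      (fun perm => "(" ++ PySem.Str.join ".*" (perm.map (fun w => "(?i)(" ++ w ++ ")")) ++ ")")
  PySem.Str.join "|" patterns

-- ===== PORT B =====
def pvPicks : List String → List (String × List String)
  | [] => []
  | h :: t => (h, t) :: (pvPicks t).map (fun p => (p.1, h :: p.2))

-- fuel = length of `remaining` (exact: every recursive call shrinks the list by one)
def pvBuild : Nat → List String → String → List String
  | 0, _, pre => ["(" ++ pre ++ ")"]
  | n + 1, remaining, pre =>
      (pvPicks remaining).flatMap
        (fun p => pvBuild n p.2 (pre ++ ".*" ++ ("(?i)(" ++ p.1 ++ ")")))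

def generate_regex_pattern_alt (input_string : String) : String :=
  let words := (PySem.Str.split₀ input_string).filter (fun x => decide (x ≠ ""))
  if words.isEmpty then "()"
  else
    PySem.Str.join "|" ((pvPicks words).flatMap
      (fun p => pvBuild (words.length - 1) p.2 ("(?i)(" ++ p.1 ++ ")")))

-- ===== PRECONDITION & SPEC =====
def Spec_generate_regex_pattern (input_string : String) (out : String) : Prop := out = generate_regex_pattern_alt input_string
instance (input_string : String) (out : String) : Decidable (Spec_generate_regex_pattern input_string out) := by unfold Spec_generate_regex_pattern; infer_instance

-- ===== CLAIM (what is proved, stated in full; the proofs are below) =====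
def Claim_equal_generate_regex_pattern : Prop := ∀ (input_string : String), Dom_generate_regex_pattern input_string → Spec_generate_regex_pattern input_string (generate_regex_pattern input_string)

-- ===== LEMMAS AND PROOFS =====

theorem pv_join_nil (sep : String) : PySem.Str.join sep [] = "" := by
  apply String.ext
  simp [PySem.Str.toList_join, PySem.Chars.join_nil]

theorem pv_join_singleton (sep x : String) : PySem.Str.join sep [x] = x := by
  apply String.ext
  simp [PySem.Str.toList_join, PySem.Chars.join_singleton]

theorem pv_join_cons_cons (sep x y : String) (l : List String) :
    PySem.Str.join sep (x :: y :: l) = x ++ sep ++ PySem.Str.join sep (y :: l) := by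
  apply String.ext
  simp [PySem.Str.toList_join, PySem.Chars.join_cons_cons]

theorem pv_hoist (sep : String) (l : List String) :
    ∀ (y c : String), c ++ l.foldl (fun a u => a ++ sep ++ u) y
      = l.foldl (fun a u => a ++ sep ++ u) (c ++ y) := by
  induction l with
  | nil => intro y c; simp
  | cons z l ih =>
      intro y c
      simp only [List.foldl_cons]
      rw [ih (y ++ sep ++ z) c, ← String.append_assoc, ← String.append_assoc]

theorem pv_joinFold (sep : String) (l : List String) :
    ∀ (x : String), PySem.Str.join sep (x :: l) = l.foldl (fun a u => a ++ sep ++ u) x := by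
  induction l with
  | nil => intro x; simp [pv_join_singleton]
  | cons y l ih =>
      intro x
      rw [pv_join_cons_cons, ih y, pv_hoist]
      simp

theorem pv_flatMap_congr {α β : Type} (l : List α) (f g : α → List β)
    (h : ∀ a ∈ l, f a = g a) : l.flatMap f = l.flatMap g := by
  induction l with
  | nil => rfl
  | cons x l ih =>
      simp only [List.flatMap_cons]
      rw [h x (by simp), ih (fun a ha => h a (by simp [ha]))]

theorem pv_picks_eq_range (xs : List String) :
    pvPicks xs = (List.range xs.length).map
      (fun i => (xs.getD i "", xs.take i ++ xs.drop (i + 1))) := by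
  induction xs with
  | nil => rfl
  | cons h t ih =>
      simp only [pvPicks, ih, List.length_cons, List.range_succ_eq_map, List.map_cons,
        List.map_map]
      refine congrArg₂ _ ?_ ?_
      · simp
      · apply List.map_congr_left
        intro i _
        simp [Function.comp, List.getD]

theorem pv_build_eq (n : Nat) : ∀ (xs : List String) (pre : String), xs.length = n →
    pvBuild n xs pre = (pvPermsA n xs).map
      (fun perm => "(" ++ perm.foldl
        (fun a u => a ++ ".*" ++ ("(?i)(" ++ u ++ ")")) pre ++ ")") := by
  induction n with
  | zero =>
      intro xs pre h
      rw [List.length_eq_zero_iff] at h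
      subst h
      simp [pvBuild, pvPermsA]
  | succ n ih =>
      intro xs pre h
      simp only [pvBuild, pvPermsA, List.map_flatMap, List.map_map]
      rw [pv_picks_eq_range, List.flatMap_map]
      apply pv_flatMap_congr
      intro i hi
      simp only [List.mem_range] at hi
      have hlen : (xs.take i ++ xs.drop (i + 1)).length = n := by
        simp [List.length_take, List.length_drop]
        omega
      rw [ih _ _ hlen]
      apply List.map_congr_left
      intro perm _
      simp [Function.comp]

theorem pv_wrap_eq (w : String) (perm : List String) :
    "(" ++ PySem.Str.join ".*" ((w :: perm).map (fun u => "(?i)(" ++ u ++ ")")) ++ ")"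
      = "(" ++ perm.foldl (fun a u => a ++ ".*" ++ ("(?i)(" ++ u ++ ")"))
          ("(?i)(" ++ w ++ ")") ++ ")" := by
  rw [List.map_cons, pv_joinFold, List.foldl_map]

theorem pv_filters_eq (l : List String) :
    l.filter (fun x => decide (0 < PySem.Str.len x)) = l.filter (fun x => decide (x ≠ "")) := by
  apply List.filter_congr
  intro x _
  simp only [decide_eq_decide, PySem.Str.len]
  constructor
  · intro h he; subst he; simp at h
  · intro h
    have : x.toList ≠ [] := fun hc => h (by apply String.ext; simp [hc])
    have := List.length_pos_of_ne_nil this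
    omega

-- ===== VERDICT (by name: the statement is the Claim_ definition above) =====
theorem generate_regex_pattern_spec : Claim_equal_generate_regex_pattern := by
  intro s _
  unfold Spec_generate_regex_pattern generate_regex_pattern generate_regex_pattern_alt
  simp only [pv_filters_eq]
  set words := (PySem.Str.split₀ s).filter (fun x => decide (x ≠ "")) with hw
  match words with
  | [] =>
      simp [pvPermsA, pv_join_nil, pv_join_singleton]
  | h :: t =>
      simp only [List.isEmpty_cons]
      simp only [List.length_cons, Nat.add_sub_cancel]
      congr 1
      simp only [List.length_cons, pvPermsA, List.map_flatMap, List.map_map]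
      rw [pv_picks_eq_range, List.flatMap_map]
      apply pv_flatMap_congr
      intro i hi
      simp only [List.mem_range] at hi
      have hlen : ((h :: t).take i ++ (h :: t).drop (i + 1)).length = t.length := by
        simp [List.length_take, List.length_drop]
        omega
      rw [pv_build_eq t.length _ _ hlen]
      apply List.map_congr_left
      intro perm _
      simp only [Function.comp]
      exact pv_wrap_eq _ perm
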